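-- pv_equiv track=rewrite | github.com/aliaydemir/lldpq | cable-check/generate_topology.py | normalize_interface_name
-- ===== SOURCE A (Python) =====
-- def normalize_interface_name(iface_name, known_device_names):
--     best_match_device_name = None
--     for device_name in known_device_names:
--         if iface_name.startswith(f"{device_name}-"):
--             if best_match_device_name is None or len(device_name) > len(best_match_device_name):
--                 best_match_device_name = device_name
--
--     if best_match_device_name:
--         normalized_name = iface_name[len(f"{best_match_device_name}-"):]
--         return normalized_name
--     return iface_name
-- ===== SOURCE B (Python) =====
-- def normalize_interface_name(iface_name, known_device_names):
--     devices = set(known_device_names)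
--     best = 0
--     for i, ch in enumerate(iface_name):
--         if ch == '-' and i > 0 and iface_name[:i] in devices:
--             best = i
--     if best:
--         return iface_name[best + 1:]
--     return iface_name
-- ===== Notes on version B (the rewrite author's own statement) =====
-- stated objective: alternative
-- what changed: B builds a set of device names once and scans the '-' positions of the interface name, keeping the largest split point whose prefix is a known device, instead of testing startswith against every device name.
import Mathlib
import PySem

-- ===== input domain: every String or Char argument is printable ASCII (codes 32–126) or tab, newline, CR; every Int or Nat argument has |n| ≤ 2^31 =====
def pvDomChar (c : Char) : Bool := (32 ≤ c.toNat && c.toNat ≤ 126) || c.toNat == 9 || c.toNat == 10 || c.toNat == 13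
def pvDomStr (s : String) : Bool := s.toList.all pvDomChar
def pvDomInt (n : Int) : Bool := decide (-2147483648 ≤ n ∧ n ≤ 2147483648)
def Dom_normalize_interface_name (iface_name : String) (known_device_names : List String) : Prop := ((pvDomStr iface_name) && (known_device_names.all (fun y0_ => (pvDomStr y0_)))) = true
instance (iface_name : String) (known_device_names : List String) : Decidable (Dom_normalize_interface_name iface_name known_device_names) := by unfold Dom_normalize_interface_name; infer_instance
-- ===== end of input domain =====

-- B scans the '-' positions of the interface name with a set of device names instead of testing startswith for every device; alternative algorithm, return value proved equal on all inputs.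


-- ===== PORT A =====
-- literal port of A: scan every device name, keep the longest whose name+'-' prefixes iface_name
def normalize_interface_name (iface_name : String) (known_device_names : List String) : String :=
  let best := known_device_names.foldl (fun best d =>
    if PySem.Str.startswith iface_name (d ++ "-") then
      match best with
      | none => some d
      | some b => if PySem.Str.len d > PySem.Str.len b then some d else some b
    else best) (none : Option String)
  match best with
  | some b => if b = "" then iface_name
              else PySem.Str.slice iface_name (some (PySem.Str.len (b ++ "-"))) none
  | none => iface_name

-- ===== PORT B =====
-- literal port of B: set of device names, scan split points of iface_name, keep the largest matching one
def normalize_interface_name_alt (iface_name : String) (known_device_names : List String) : String :=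
  let devices := PySem.Set.ofList known_device_names
  let best : Int := (PySem.List.enumerate iface_name.toList).foldl (fun best p =>
    if p.2 = '-' ∧ 0 < p.1 ∧ PySem.Set.contains devices (PySem.Str.slice iface_name none (some p.1)) then p.1 else best) 0
  if best ≠ 0 then PySem.Str.slice iface_name (some (best + 1)) none
  else iface_name

-- ===== PRECONDITION & SPEC =====
def Spec_normalize_interface_name (iface_name : String) (known_device_names : List String) (out : String) : Prop := out = normalize_interface_name_alt iface_name known_device_names
instance (iface_name : String) (known_device_names : List String) (out : String) : Decidable (Spec_normalize_interface_name iface_name known_device_names out) := by unfold Spec_normalize_interface_name; infer_instance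

-- ===== CLAIM (what is proved, stated in full; the proofs are below) =====
def Claim_equal_normalize_interface_name : Prop := ∀ (iface_name : String) (known_device_names : List String), Dom_normalize_interface_name iface_name known_device_names → Spec_normalize_interface_name iface_name known_device_names (normalize_interface_name iface_name known_device_names)

-- ===== LEMMAS AND PROOFS =====

-- a split point of l w.r.t. ds: position j carries '-' and the prefix before it is a known device
def pvCand (l : List Char) (ds : List String) (j : Nat) : Prop :=
  l[j]? = some '-' ∧ String.ofList (l.take j) ∈ ds

-- "d+'-' is a prefix of l" unpacked at position d.toList.length
theorem pvMatches_iff (l u : List Char) :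
    (u ++ ['-']) <+: l ↔ (l.take u.length = u ∧ l[u.length]? = some '-') := by
  constructor
  · intro h
    have htake : u ++ ['-'] = l.take (u.length + 1) := by
      have := List.prefix_iff_eq_take.mp h
      simpa using this
    have hlen : u.length + 1 ≤ l.length := by
      have := h.length_le; simpa using this
    have hsucc : l.take (u.length + 1) = l.take u.length ++ [l[u.length]] := by
      rw [List.take_add_one, List.getElem?_eq_getElem (by omega)]; rfl
    rw [hsucc] at htake
    have h1 : u = l.take u.length := by
      apply List.append_inj_left htake
      simp [Nat.min_eq_left (by omega : u.length ≤ l.length)]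
    have h2 : ['-'] = [l[u.length]] := by
      apply List.append_inj_right htake
      simp [Nat.min_eq_left (by omega : u.length ≤ l.length)]
    refine ⟨h1.symm, ?_⟩
    rw [List.getElem?_eq_getElem (by omega)]
    simpa using h2.symm
  · rintro ⟨h1, h2⟩
    have hlt : u.length < l.length := by
      have := List.getElem?_eq_some_iff.mp h2; exact this.1
    have : u ++ ['-'] = l.take (u.length + 1) := by
      rw [List.take_add_one, h1, h2]; rfl
    rw [List.prefix_iff_eq_take]
    simpa using this

-- characterization of A's fold: none ↔ no device matches; some b → b matches, is in the pool, and dominates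
theorem pvFoldA_spec (l : List Char) : ∀ (ds : List String) (acc : Option String),
    (∀ b, acc = some b → (b.toList ++ ['-']) <+: l) →
    (let r := ds.foldl (fun best d =>
        if PySem.Chars.startswith l (d.toList ++ ['-']) then
          match best with
          | none => some d
          | some b => if (d.toList.length : Int) > (b.toList.length : Int) then some d else some b
        else best) acc
     (∀ b, r = some b → (b.toList ++ ['-']) <+: l ∧
        (acc = some b ∨ b ∈ ds) ∧
        (∀ a, acc = some a → a.toList.length ≤ b.toList.length) ∧
        (∀ d ∈ ds, (d.toList ++ ['-']) <+: l → d.toList.length ≤ b.toList.length)) ∧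
     (r = none → acc = none ∧ ∀ d ∈ ds, ¬ (d.toList ++ ['-']) <+: l)) := by
  intro ds
  induction ds with
  | nil =>
    intro acc hacc
    refine ⟨fun b hb => ?_, fun hn => ?_⟩
    · simp only [List.foldl_nil] at hb
      refine ⟨hacc b hb, Or.inl hb, ?_, by simp⟩
      intro a ha
      rw [ha] at hb
      cases hb
      exact le_refl _
    · simp only [List.foldl_nil] at hn
      exact ⟨hn, by simp⟩
  | cons d ds ih =>
    intro acc hacc
    simp only [List.foldl_cons]
    by_cases hm : PySem.Chars.startswith l (d.toList ++ ['-'])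
    · have hmp : (d.toList ++ ['-']) <+: l := (PySem.Chars.startswith_iff l _).mp hm
      rw [if_pos hm]
      cases acc with
      | none =>
        have hstep : (match (none : Option String) with
            | none => some d
            | some b => if (d.toList.length : Int) > (b.toList.length : Int) then some d else some b) = some d := rfl
        rw [hstep]
        have key := ih (some d) (by intro b hb; injection hb with hb; rw [← hb]; exact hmp)
        refine ⟨fun b hb => ?_, fun hn => ?_⟩
        · obtain ⟨h1, h2, h3, h4⟩ := key.1 b hb
          refine ⟨h1, Or.inr ?_, ?_, ?_⟩
          · rcases h2 with h2 | h2
            · injection h2 with h2; rw [h2]; simp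
            · exact List.mem_cons_of_mem _ h2
          · intro a ha; cases ha
          · intro e he hme
            rcases List.mem_cons.mp he with rfl | he
            · exact h3 e rfl
            · exact h4 e he hme
        · exact absurd (key.2 hn).1 (by simp)
      | some b0 =>
        have hstep : (match (some b0 : Option String) with
            | none => some d
            | some b => if (d.toList.length : Int) > (b.toList.length : Int) then some d else some b) =
            (if (d.toList.length : Int) > (b0.toList.length : Int) then some d else some b0) := rfl
        rw [hstep]
        by_cases hgt : (d.toList.length : Int) > (b0.toList.length : Int)
        · rw [if_pos hgt]
          have key := ih (some d) (by intro b hb; injection hb with hb; rw [← hb]; exact hmp)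
          refine ⟨fun b hb => ?_, fun hn => ?_⟩
          · obtain ⟨h1, h2, h3, h4⟩ := key.1 b hb
            refine ⟨h1, Or.inr ?_, ?_, ?_⟩
            · rcases h2 with h2 | h2
              · injection h2 with h2; rw [h2]; simp
              · exact List.mem_cons_of_mem _ h2
            · intro a ha
              injection ha with ha
              have hd := h3 d rfl
              have : a.toList.length = b0.toList.length := by rw [ha]
              omega
            · intro e he hme
              rcases List.mem_cons.mp he with rfl | he
              · exact h3 e rfl
              · exact h4 e he hme
          · exact absurd (key.2 hn).1 (by simp)
        · rw [if_neg hgt]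
          have key := ih (some b0) hacc
          refine ⟨fun b hb => ?_, fun hn => ?_⟩
          · obtain ⟨h1, h2, h3, h4⟩ := key.1 b hb
            refine ⟨h1, by tauto, h3, ?_⟩
            intro e he hme
            rcases List.mem_cons.mp he with rfl | he
            · have := h3 b0 rfl; omega
            · exact h4 e he hme
          · exact absurd (key.2 hn).1 (by simp)
    · rw [if_neg hm]
      have key := ih acc hacc
      refine ⟨fun b hb => ?_, fun hn => ?_⟩
      · obtain ⟨h1, h2, h3, h4⟩ := key.1 b hb
        refine ⟨h1, by tauto, h3, ?_⟩
        intro e he hme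
        rcases List.mem_cons.mp he with rfl | he
        · exact absurd hme ((PySem.Chars.startswith_iff l _).not.mp hm)
        · exact h4 e he hme
      · refine ⟨(key.2 hn).1, ?_⟩
        intro e he hme
        rcases List.mem_cons.mp he with rfl | he
        · exact ((PySem.Chars.startswith_iff l _).not.mp hm) hme
        · exact (key.2 hn).2 e he hme

-- characterization of B's fold over a pairwise-increasing pair list
theorem pvFoldB_spec {f : Int × Char → Prop} [DecidablePred f] :
    ∀ (ps : List (Int × Char)) (b : Int), ps.Pairwise (fun p q => p.1 < q.1) →
    (let r := ps.foldl (fun best p => if f p then p.1 else best) b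
     (r = b ∧ ∀ p ∈ ps, ¬ f p) ∨
     (∃ p ∈ ps, f p ∧ r = p.1 ∧ ∀ q ∈ ps, f q → q.1 ≤ p.1)) := by
  intro ps
  induction ps with
  | nil => intro b _; exact Or.inl ⟨rfl, by simp⟩
  | cons p t ih =>
    intro b hpw
    have hpw' := (List.pairwise_cons.mp hpw).2
    have hlt := (List.pairwise_cons.mp hpw).1
    simp only [List.foldl_cons]
    by_cases hf : f p
    · rw [if_pos hf]
      rcases ih p.1 hpw' with ⟨hr, hnone⟩ | ⟨q, hq, hfq, hr, hmax⟩
      · refine Or.inr ⟨p, List.mem_cons_self, hf, hr, ?_⟩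
        intro q hq hfq
        rcases List.mem_cons.mp hq with rfl | hq
        · exact le_refl _
        · exact absurd hfq (hnone q hq)
      · refine Or.inr ⟨q, List.mem_cons_of_mem _ hq, hfq, hr, ?_⟩
        intro e he hfe
        rcases List.mem_cons.mp he with rfl | he
        · exact le_of_lt (hlt q hq)
        · exact hmax e he hfe
    · rw [if_neg hf]
      rcases ih b hpw' with ⟨hr, hnone⟩ | ⟨q, hq, hfq, hr, hmax⟩
      · refine Or.inl ⟨hr, ?_⟩
        intro e he
        rcases List.mem_cons.mp he with rfl | he
        · exact hf
        · exact hnone e he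
      · refine Or.inr ⟨q, List.mem_cons_of_mem _ hq, hfq, hr, ?_⟩
        intro e he hfe
        rcases List.mem_cons.mp he with rfl | he
        · exact absurd hfe hf
        · exact hmax e he hfe

-- helper: a split point j yields a matching device name of length j
theorem pvCand_matches (l : List Char) (ds : List String) (j : Nat) (hc : pvCand l ds j) :
    ((String.ofList (l.take j)).toList ++ ['-']) <+: l ∧ (String.ofList (l.take j)).toList.length = j := by
  obtain ⟨h1, h2⟩ := hc
  have hj : j < l.length := (List.getElem?_eq_some_iff.mp h1).1
  have htl : (String.ofList (l.take j)).toList = l.take j := by simp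
  have hlen : (String.ofList (l.take j)).toList.length = j := by
    rw [htl]; simp [Nat.min_eq_left (le_of_lt hj)]
  refine ⟨?_, hlen⟩
  rw [pvMatches_iff, hlen, htl]
  exact ⟨rfl, h1⟩

-- ===== VERDICT (by name: the statement is the Claim_ definition above) =====
theorem normalize_interface_name_spec : Claim_equal_normalize_interface_name := by
  intro s ds _
  unfold Spec_normalize_interface_name
  have hdash : ("-" : String).toList = ['-'] := rfl
  have keyA := pvFoldA_spec s.toList ds none (by simp)
  have keyB := pvFoldB_spec
    (f := fun p : Int × Char => p.2 = '-' ∧ 0 < p.1 ∧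
        PySem.Set.contains (PySem.Set.ofList ds) (PySem.Str.slice s none (some p.1)) = true)
    (PySem.List.enumerate s.toList 0) 0 (PySem.List.pairwise_lt_enumerate s.toList 0)
  simp only [normalize_interface_name, normalize_interface_name_alt,
    PySem.Str.startswith_eq, PySem.Str.len_eq, String.toList_append, hdash] at *
  -- name B's fold value
  rcases keyB with ⟨hr0, hnone⟩ | ⟨p, hp, hfp, hrp, hmax⟩
  · -- no split point with positive index: B returns s
    rw [hr0]
    simp only [ne_eq, not_true_eq_false, if_false]
    -- show A also returns s
    split
    · rename_i b hF
      obtain ⟨h1, h2, _, h4⟩ := keyA.1 b hF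
      rcases h2 with h2 | h2
      · cases h2
      · -- b is a matching device; show b = "" (else a positive split point exists)
        split
        · rfl
        · rename_i hbne
          exfalso
          have hm := (pvMatches_iff s.toList b.toList).mp h1
          have hmpos : 0 < b.toList.length := by
            rcases Nat.eq_zero_or_pos b.toList.length with h0 | h0
            · exact absurd (String.toList_inj.mp (by simpa [List.length_eq_zero_iff] using h0)) hbne
            · exact h0
          have hjlt : b.toList.length < s.toList.length :=
            (List.getElem?_eq_some_iff.mp hm.2).1
          have hpmem : ((b.toList.length : Int), s.toList[b.toList.length]) ∈
              PySem.List.enumerate s.toList 0 := by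
            rw [PySem.List.mem_enumerate_iff]
            exact ⟨b.toList.length, hjlt, by simp⟩
          refine hnone _ hpmem ⟨?_, ?_, ?_⟩
            <;> simp only []
          · have := hm.2
            rw [List.getElem?_eq_getElem hjlt] at this
            simpa using this
          · exact_mod_cast hmpos
          · have hsl : PySem.Str.slice s none (some (b.toList.length : Int)) =
                String.ofList (s.toList.take b.toList.length) := by
              apply String.toList_inj.mp
              simp [PySem.Str.toList_slice, PySem.List.slice_to_natCast]
            rw [hsl, hm.1]
            have : String.ofList b.toList = b := String.toList_inj.mp (by simp)
            rw [this]
            simpa [PySem.Set.contains] using (PySem.Set.mem_ofList ds b).mpr h2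
    · rfl
  · -- B found the largest positive split point p.1
    obtain ⟨k, hk, rfl⟩ := (PySem.List.mem_enumerate_iff _ _ _).mp hp
    obtain ⟨hf1, hf2, hf3⟩ := hfp
    simp only [] at hf1 hf2 hf3 hrp
    have hk0 : 0 < k := by exact_mod_cast (by simpa using hf2 : (0 : Int) < (k : Int))
    have hck : pvCand s.toList ds k := by
      refine ⟨by rw [List.getElem?_eq_getElem hk]; simpa using hf1, ?_⟩
      have hsl : PySem.Str.slice s none (some ((0 : Int) + (k : Nat))) =
          String.ofList (s.toList.take k) := by
        apply String.toList_inj.mp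
        rw [show ((0 : Int) + (k : Nat)) = ((k : Nat) : Int) by omega]
        simp [PySem.Str.toList_slice, PySem.List.slice_to_natCast]
      rw [hsl] at hf3
      simpa [PySem.Set.contains, PySem.Set.mem_ofList] using hf3
    obtain ⟨hkmatch, hklen⟩ := pvCand_matches s.toList ds k hck
    rw [hrp]
    have hne : ¬ ((0 : Int) + (k : Nat)) = 0 := by
      intro h; omega
    rw [if_pos (by simpa using hne)]
    -- A's fold cannot be none
    split
    · rename_i b hF
      obtain ⟨h1, h2, _, h4⟩ := keyA.1 b hF
      rcases h2 with h2 | h2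
      · cases h2
      · have hm := (pvMatches_iff s.toList b.toList).mp h1
        -- k ≤ |b| since take k is a matching device
        have hkle : k ≤ b.toList.length := by
          have := h4 (String.ofList (s.toList.take k)) (hck.2) hkmatch
          omega
        -- |b| ≤ k via B's maximality
        have hble : b.toList.length ≤ k := by
          by_cases hb0 : b.toList.length = 0
          · omega
          · have hjlt : b.toList.length < s.toList.length :=
              (List.getElem?_eq_some_iff.mp hm.2).1
            have hpmem : ((b.toList.length : Int), s.toList[b.toList.length]) ∈
                PySem.List.enumerate s.toList 0 := by
              rw [PySem.List.mem_enumerate_iff]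
              exact ⟨b.toList.length, hjlt, by simp⟩
            have := hmax _ hpmem ⟨?_, ?_, ?_⟩
            · have h := this
              simp only [] at h
              omega
            · have := hm.2
              rw [List.getElem?_eq_getElem hjlt] at this
              simpa using this
            · simp only []
              exact_mod_cast Nat.pos_of_ne_zero hb0
            · simp only []
              have hsl : PySem.Str.slice s none (some (b.toList.length : Int)) =
                  String.ofList (s.toList.take b.toList.length) := by
                apply String.toList_inj.mp
                simp [PySem.Str.toList_slice, PySem.List.slice_to_natCast]
              rw [hsl, hm.1]
              have : String.ofList b.toList = b := String.toList_inj.mp (by simp)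
              rw [this]
              simpa [PySem.Set.contains] using (PySem.Set.mem_ofList ds b).mpr h2
        have hbk : b.toList.length = k := le_antisymm hble hkle
        -- b is nonempty, so A strips
        split
        · rename_i hbe
          exfalso
          have : b.toList.length = 0 := by rw [hbe]; rfl
          omega
        · -- both are the same slice
          congr 1
          simp only [List.length_append, List.length_cons, List.length_nil, Option.some.injEq]
          push_cast
          omega
    · rename_i hF
      exfalso
      exact (keyA.2 hF).2 _ hck.2 hkmatch
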